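-- pv_equiv track=rewrite | github.com/egorman44/digital_communicaiton | crc/vcd/vcd_parser.py | fill_missing_times
-- ===== SOURCE A (Python) =====
-- def fill_missing_times(io_dataIn, total_time_points):
--     # Initialize the final list with the first element of the input list
--     final_data = [io_dataIn[0]]
--
--     # Iterate over the input list to find gaps
--     for i in range(1, len(io_dataIn)):
--         prev_time, prev_value = io_dataIn[i - 1]
--         curr_time, curr_value = io_dataIn[i]
--
--         # Add missing time points
--         for t in range(prev_time + 1, curr_time):
--             final_data.append((t, prev_value))
--
--         # Append the current tuple
--         final_data.append((curr_time, curr_value))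
--
--     # Fill up to the total time points if needed
--     last_time, last_value = final_data[-1]
--     for t in range(last_time + 1, total_time_points):
--         final_data.append((t, last_value))
--
--     return final_data
-- ===== SOURCE B (Python) =====
-- def fill_missing_times(io_dataIn, total_time_points):
--     # Build the result back-to-front: walk the entries in reverse, carrying the
--     # upper boundary (initially total_time_points) down; collect each entry's
--     # segment (the entry plus its gap fill), then flatten them in reverse.
--     segs = []
--     bound = total_time_points
--     for time, value in reversed(io_dataIn):
--         seg = [(time, value)]
--         seg.extend((t, value) for t in range(time + 1, bound))
--         segs.append(seg)
--         bound = time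
--     segs.reverse()
--     return [point for seg in segs for point in seg]
-- ===== Notes on version B (the rewrite author's own statement) =====
-- stated objective: alternative
-- what changed: Builds the result back-to-front: a single reverse traversal carries the next boundary downwards, collecting each entry's segment (entry plus gap fill) and flattening them in reverse, eliminating A's first-element seed, look-back pairing and separate tail-fill phase.
import Mathlib
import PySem

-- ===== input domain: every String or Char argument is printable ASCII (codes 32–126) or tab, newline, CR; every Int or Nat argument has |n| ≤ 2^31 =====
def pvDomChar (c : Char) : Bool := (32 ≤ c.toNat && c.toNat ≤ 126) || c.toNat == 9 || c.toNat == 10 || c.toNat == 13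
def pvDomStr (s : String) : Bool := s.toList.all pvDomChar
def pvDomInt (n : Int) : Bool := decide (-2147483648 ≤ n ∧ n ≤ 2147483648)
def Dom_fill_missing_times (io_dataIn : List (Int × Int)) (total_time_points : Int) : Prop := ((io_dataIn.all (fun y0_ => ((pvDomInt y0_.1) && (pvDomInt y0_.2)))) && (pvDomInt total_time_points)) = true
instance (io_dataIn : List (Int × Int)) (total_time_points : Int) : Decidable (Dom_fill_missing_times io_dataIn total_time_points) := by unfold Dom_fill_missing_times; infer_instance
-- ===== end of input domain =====

-- B builds the result back-to-front in one reverse traversal carrying the next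
-- boundary, instead of A's seed + look-back pair loop + separate tail fill
-- (objective: alternative).

-- ===== PORT A =====
-- A's 'for i in range(1, len)' pairing io_dataIn[i-1] with io_dataIn[i], as the
-- obvious structural recursion over consecutive pairs (prev carried as state).
def fmtGapsA (prev : Int × Int) (rest : List (Int × Int)) : List (Int × Int) :=
  match rest with
  | [] => []
  | curr :: r =>
      ((PySem.List.pyRange (prev.1 + 1) curr.1 1).map (fun t => (t, prev.2)) ++ [curr])
        ++ fmtGapsA curr r

def fill_missing_times (io_dataIn : List (Int × Int)) (total_time_points : Int) : List (Int × Int) :=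
  match io_dataIn with
  | [] => []  -- Python raises IndexError here (io_dataIn[0]); excluded by Pre_
  | x0 :: rest =>
    let final_data := x0 :: fmtGapsA x0 rest
    match PySem.List.pyGet? final_data (-1) with  -- final_data[-1]
    | none => final_data  -- unreachable: final_data is nonempty
    | some last =>
        final_data ++ (PySem.List.pyRange (last.1 + 1) total_time_points 1).map (fun t => (t, last.2))

-- ===== PORT B =====
-- B's 'for time, value in reversed(io_dataIn)' collecting each entry's segment
-- with state (bound, segs), then segs.reverse() and a flattening comprehension.
def fmtSeg (p : Int × Int) (bound : Int) : List (Int × Int) :=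
  (p.1, p.2) :: (PySem.List.pyRange (p.1 + 1) bound 1).map (fun t => (t, p.2))

def fill_missing_times_alt (io_dataIn : List (Int × Int)) (total_time_points : Int) : List (Int × Int) :=
  let st := io_dataIn.reverse.foldl
    (fun (st : Int × List (List (Int × Int))) p => (p.1, st.2 ++ [fmtSeg p st.1]))
    (total_time_points, [])
  st.2.reverse.flatten

-- ===== PRECONDITION & SPEC =====
-- Pre_ excludes only the empty list, on which Python A raises IndexError.
def Pre_fill_missing_times (io_dataIn : List (Int × Int)) (total_time_points : Int) : Prop :=
  io_dataIn ≠ []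
instance (io_dataIn : List (Int × Int)) (total_time_points : Int) : Decidable (Pre_fill_missing_times io_dataIn total_time_points) := by unfold Pre_fill_missing_times; infer_instance
def pvWitness_fill_missing_times : (List (Int × Int)) × Int := ([(0, 1), (3, 2)], 6)

def Spec_fill_missing_times (io_dataIn : List (Int × Int)) (total_time_points : Int) (out : List (Int × Int)) : Prop := out = fill_missing_times_alt io_dataIn total_time_points
instance (io_dataIn : List (Int × Int)) (total_time_points : Int) (out : List (Int × Int)) : Decidable (Spec_fill_missing_times io_dataIn total_time_points out) := by unfold Spec_fill_missing_times; infer_instance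

-- ===== CLAIM (what is proved, stated in full; the proofs are below) =====
def Claim_equal_fill_missing_times : Prop := ∀ (io_dataIn : List (Int × Int)) (total_time_points : Int), Dom_fill_missing_times io_dataIn total_time_points → Pre_fill_missing_times io_dataIn total_time_points → Spec_fill_missing_times io_dataIn total_time_points (fill_missing_times io_dataIn total_time_points)


-- ===== LEMMAS AND PROOFS =====

-- The last element of A's accumulated list is the last input element.
theorem getLast?_cons_fmtGapsA (rest : List (Int × Int)) (p : Int × Int) :
    (p :: fmtGapsA p rest).getLast? = some (rest.getLastD p) := by
  induction rest generalizing p with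
  | nil => simp [fmtGapsA]
  | cons c r ih =>
    have : (p :: fmtGapsA p (c :: r)) =
        (p :: (PySem.List.pyRange (p.1 + 1) c.1 1).map (fun t => (t, p.2))) ++ (c :: fmtGapsA c r) := by
      simp [fmtGapsA]
    rw [this, List.getLast?_append, ih]
    cases r <;> simp [List.getLastD]

-- The forward list of per-entry segments B's reverse loop accumulates.
def segsFwd (p : Int × Int) (rest : List (Int × Int)) (T : Int) : List (List (Int × Int)) :=
  match rest with
  | [] => [fmtSeg p T]
  | c :: r => fmtSeg p c.1 :: segsFwd c r T

-- B's reverse fold (a right fold over the original list) builds segsFwd reversed.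
theorem foldr_segs (rest : List (Int × Int)) (p : Int × Int) (T : Int) :
    ((p :: rest).foldr (fun q (st : Int × List (List (Int × Int))) => (q.1, st.2 ++ [fmtSeg q st.1])) (T, []))
      = (p.1, (segsFwd p rest T).reverse) := by
  induction rest generalizing p with
  | nil => simp [segsFwd]
  | cons c r ih =>
    rw [List.foldr_cons, ih c]
    simp [segsFwd]

-- Flattening the segments yields A's entry-then-gap list followed by the tail fill.
theorem flatten_segsFwd (rest : List (Int × Int)) (p : Int × Int) (T : Int) :
    (segsFwd p rest T).flatten
      = (p :: fmtGapsA p rest)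
        ++ (PySem.List.pyRange ((rest.getLastD p).1 + 1) T 1).map (fun t => (t, (rest.getLastD p).2)) := by
  induction rest generalizing p with
  | nil => simp [segsFwd, fmtSeg, fmtGapsA]
  | cons c r ih =>
    show (fmtSeg p c.1 :: segsFwd c r T).flatten = _
    rw [List.flatten_cons, ih c]
    cases r <;> simp [fmtSeg, fmtGapsA, List.getLastD]

theorem fill_missing_times_spec : Claim_equal_fill_missing_times := by
  intro xs T _ hpre
  unfold Spec_fill_missing_times
  match xs with
  | [] => exact absurd rfl hpre
  | x0 :: rest =>
    simp only [fill_missing_times]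
    rw [PySem.List.pyGet?_neg_one, getLast?_cons_fmtGapsA]
    show _ = (((x0 :: rest).reverse.foldl
        (fun (st : Int × List (List (Int × Int))) p => (p.1, st.2 ++ [fmtSeg p st.1]))
        (T, [])).2).reverse.flatten
    rw [List.foldl_reverse, foldr_segs, List.reverse_reverse, flatten_segsFwd]
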